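-- pv_equiv track=rewrite | github.com/bczovek/yca | app/words.py | __context_sentiment
-- ===== SOURCE A (Python) =====
-- def __context_sentiment(pos_freq, neg_freq, neu_freq):
--     result = dict()
--     for k, v in pos_freq:
--         result[k] = [v, 0, 0]
--     for k,v in neu_freq:
--         try:
--             result[k][1] = v
--         except:
--             result[k] = [0, v, 0]
--     for k,v in neg_freq:
--         try:
--             result[k][2] = v
--         except:
--             result[k] = [0, 0, v]
--     return result
-- ===== SOURCE B (Python) =====
-- def __context_sentiment(pos_freq, neg_freq, neu_freq):
--     # build lookup tables once (last value wins, like dict insertion), then one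
--     # pass over the ordered union of keys
--     pos, neu, neg = dict(pos_freq), dict(neu_freq), dict(neg_freq)
--     return {k: [pos.get(k, 0), neu.get(k, 0), neg.get(k, 0)]
--             for k in dict.fromkeys(list(pos) + list(neu) + list(neg))}
-- ===== Notes on version B (the rewrite author's own statement) =====
-- stated objective: simpler
-- what changed: Replaces the three mutating try/except passes over one shared result dict with building three lookup dicts once and a single comprehension over the ordered union of keys producing each triple directly.
import Mathlib
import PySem

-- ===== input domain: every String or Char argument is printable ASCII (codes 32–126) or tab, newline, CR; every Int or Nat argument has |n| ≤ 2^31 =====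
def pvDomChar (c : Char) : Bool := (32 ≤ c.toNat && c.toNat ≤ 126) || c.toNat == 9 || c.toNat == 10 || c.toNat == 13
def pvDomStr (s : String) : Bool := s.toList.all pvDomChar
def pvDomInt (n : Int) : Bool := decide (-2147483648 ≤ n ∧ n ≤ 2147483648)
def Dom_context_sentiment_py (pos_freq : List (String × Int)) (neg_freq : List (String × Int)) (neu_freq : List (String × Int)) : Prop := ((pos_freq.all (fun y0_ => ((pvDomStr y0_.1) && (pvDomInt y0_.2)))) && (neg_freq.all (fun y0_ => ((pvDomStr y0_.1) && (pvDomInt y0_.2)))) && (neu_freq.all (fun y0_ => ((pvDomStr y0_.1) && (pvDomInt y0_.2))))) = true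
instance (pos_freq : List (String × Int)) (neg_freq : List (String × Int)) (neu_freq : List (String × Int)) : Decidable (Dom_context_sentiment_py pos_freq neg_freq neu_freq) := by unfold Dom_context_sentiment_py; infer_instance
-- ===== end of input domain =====

-- B replaces A's three mutating try/except passes over one shared dict by three
-- lookup tables built once plus a single pass over the ordered union of keys
-- (objective: simpler; same asymptotic cost).

-- ===== PORT A =====
-- three passes over one result dict; result[k][i] = v is ported as re-inserting
-- the updated list at the same key (Dict.insert overwrites in place)
def context_sentiment_py (pos_freq : List (String × Int)) (neg_freq : List (String × Int)) (neu_freq : List (String × Int)) : List (String × List Int) :=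
  let r0 : PySem.Dict String (List Int) :=
    pos_freq.foldl (fun d p => d.insert p.1 [p.2, 0, 0]) PySem.Dict.empty
  let r1 :=
    neu_freq.foldl (fun d p =>
      match d.get? p.1 with
      | some lst => d.insert p.1 (lst.set 1 p.2)   -- try: result[k][1] = v
      | none     => d.insert p.1 [0, p.2, 0]) r0   -- except: result[k] = [0, v, 0]
  let r2 :=
    neg_freq.foldl (fun d p =>
      match d.get? p.1 with
      | some lst => d.insert p.1 (lst.set 2 p.2)   -- try: result[k][2] = v
      | none     => d.insert p.1 [0, 0, p.2]) r1   -- except: result[k] = [0, 0, v]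
  r2.items

-- ===== PORT B =====
def context_sentiment_py_alt (pos_freq : List (String × Int)) (neg_freq : List (String × Int)) (neu_freq : List (String × Int)) : List (String × List Int) :=
  let pos := PySem.Dict.ofList pos_freq
  let neu := PySem.Dict.ofList neu_freq
  let neg := PySem.Dict.ofList neg_freq
  (PySem.Set.ofList (pos.keys ++ neu.keys ++ neg.keys)).map
    (fun k => (k, [pos.getD k 0, neu.getD k 0, neg.getD k 0]))

-- ===== PRECONDITION & SPEC =====
def Spec_context_sentiment_py (pos_freq : List (String × Int)) (neg_freq : List (String × Int)) (neu_freq : List (String × Int)) (out : List (String × List Int)) : Prop := out = context_sentiment_py_alt pos_freq neg_freq neu_freq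
instance (pos_freq : List (String × Int)) (neg_freq : List (String × Int)) (neu_freq : List (String × Int)) (out : List (String × List Int)) : Decidable (Spec_context_sentiment_py pos_freq neg_freq neu_freq out) := by unfold Spec_context_sentiment_py; infer_instance

-- ===== CLAIM (what is proved, stated in full; the proofs are below) =====
def Claim_equal_context_sentiment_py : Prop := ∀ (pos_freq : List (String × Int)) (neg_freq : List (String × Int)) (neu_freq : List (String × Int)), Dom_context_sentiment_py pos_freq neg_freq neu_freq → Spec_context_sentiment_py pos_freq neg_freq neu_freq (context_sentiment_py pos_freq neg_freq neu_freq)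

-- ===== LEMMAS AND PROOFS =====

-- the values stored under key k, in order
def pvVals (l : List (String × Int)) (k : String) : List Int :=
  (l.filter (fun p => p.1 == k)).map Prod.snd

-- get? after a fold of inserts whose value depends on the dict only through get? at the key
theorem pv_get?_foldl {ν : Type} (g : Option ν → Int → ν) (l : List (String × Int))
    (d : PySem.Dict String ν) (k : String) :
    (l.foldl (fun d p => d.insert p.1 (g (d.get? p.1) p.2)) d).get? k
      = (pvVals l k).foldl (fun o v => some (g o v)) (d.get? k) := by
  induction l generalizing d with
  | nil => rfl
  | cons p t ih =>
    simp only [List.foldl_cons, ih, pvVals, List.filter_cons]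
    by_cases h : p.1 = k
    · subst h
      simp
    · have hb : (p.1 == k) = false := by simpa using h
      have hk : ¬ k = p.1 := fun hh => h hh.symm
      simp [hb, PySem.Dict.get?_insert, hk]

theorem pv_fold_last (vs : List Int) (s : Option Int) :
    vs.foldl (fun _ v => some v) s = match vs.getLast? with
      | none => s | some v => some v := by
  induction vs generalizing s with
  | nil => rfl
  | cons v t ih =>
    cases t with
    | nil => simp
    | cons w u =>
      simp only [List.foldl_cons, ih, List.getLast?_cons_cons]
      rcases hgl : (w :: u).getLast? with _ | x
      · exact absurd (List.getLast?_eq_none_iff.mp hgl) (by simp)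
      · rfl

theorem pv_fold_first (vs : List Int) (s : Option (List Int)) :
    vs.foldl (fun _ v => some [v, 0, 0]) s = match vs.getLast? with
      | none => s | some v => some [v, 0, 0] := by
  induction vs generalizing s with
  | nil => rfl
  | cons v t ih =>
    cases t with
    | nil => simp
    | cons w u =>
      simp only [List.foldl_cons, ih, List.getLast?_cons_cons]
      rcases hgl : (w :: u).getLast? with _ | x
      · exact absurd (List.getLast?_eq_none_iff.mp hgl) (by simp)
      · rfl

theorem pv_fold_set (i : Nat) (vs : List Int) (s : Option (List Int)) :
    vs.foldl (fun o v => some ((o.getD [0, 0, 0]).set i v)) s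
      = match vs.getLast? with
        | none => s | some v => some ((s.getD [0, 0, 0]).set i v) := by
  induction vs generalizing s with
  | nil => rfl
  | cons v t ih =>
    cases t with
    | nil => simp
    | cons w u =>
      simp only [List.foldl_cons, ih, List.getLast?_cons_cons]
      rcases hgl : (w :: u).getLast? with _ | x
      · exact absurd (List.getLast?_eq_none_iff.mp hgl) (by simp)
      · simp [List.set_set]

-- get? into A's final dict, as a function of the three per-key value lists
theorem pv_getA (pos_freq neg_freq neu_freq : List (String × Int)) (k : String)
    (h : (pvVals pos_freq k).getLast? ≠ none ∨ (pvVals neu_freq k).getLast? ≠ none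
       ∨ (pvVals neg_freq k).getLast? ≠ none) :
    (neg_freq.foldl (fun d p =>
        match d.get? p.1 with
        | some lst => d.insert p.1 (lst.set 2 p.2)
        | none     => d.insert p.1 [0, 0, p.2])
      (neu_freq.foldl (fun d p =>
        match d.get? p.1 with
        | some lst => d.insert p.1 (lst.set 1 p.2)
        | none     => d.insert p.1 [0, p.2, 0])
        (pos_freq.foldl (fun d p => d.insert p.1 [p.2, 0, 0]) PySem.Dict.empty))).get? k
    = some [((pvVals pos_freq k).getLast?).getD 0,
            ((pvVals neu_freq k).getLast?).getD 0,
            ((pvVals neg_freq k).getLast?).getD 0] := by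
  have h1 : (fun (d : PySem.Dict String (List Int)) (p : String × Int) => d.insert p.1 [p.2, 0, 0])
      = fun d p => d.insert p.1 ((fun (_ : Option (List Int)) (v : Int) => [v, 0, 0]) (d.get? p.1) p.2) := rfl
  have h2 : (fun (d : PySem.Dict String (List Int)) (p : String × Int) =>
        match d.get? p.1 with
        | some lst => d.insert p.1 (lst.set 1 p.2)
        | none     => d.insert p.1 [0, p.2, 0])
      = fun d p => d.insert p.1 ((fun (o : Option (List Int)) (v : Int) => (o.getD [0,0,0]).set 1 v) (d.get? p.1) p.2) := by
    funext d p; cases d.get? p.1 <;> rfl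
  have h3 : (fun (d : PySem.Dict String (List Int)) (p : String × Int) =>
        match d.get? p.1 with
        | some lst => d.insert p.1 (lst.set 2 p.2)
        | none     => d.insert p.1 [0, 0, p.2])
      = fun d p => d.insert p.1 ((fun (o : Option (List Int)) (v : Int) => (o.getD [0,0,0]).set 2 v) (d.get? p.1) p.2) := by
    funext d p; cases d.get? p.1 <;> rfl
  rw [h1, h2, h3,
      pv_get?_foldl (fun o v => (Option.getD o [0, 0, 0]).set 2 v) neg_freq,
      pv_get?_foldl (fun o v => (Option.getD o [0, 0, 0]).set 1 v) neu_freq,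
      pv_get?_foldl (fun _ v => [v, 0, 0]) pos_freq]
  have he : (PySem.Dict.empty : PySem.Dict String (List Int)).get? k = none := rfl
  rw [he, pv_fold_first, pv_fold_set, pv_fold_set]
  rcases hp : (pvVals pos_freq k).getLast? with _ | p <;>
    rcases hn : (pvVals neu_freq k).getLast? with _ | n <;>
    rcases hg : (pvVals neg_freq k).getLast? with _ | g <;>
    simp_all

-- get? into a plain dict built from a pair list
theorem pv_getOf (l : List (String × Int)) (k : String) :
    (PySem.Dict.ofList l).get? k = (pvVals l k).getLast? := by
  have h0 : PySem.Dict.ofList l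
      = l.foldl (fun d p => d.insert p.1 ((fun (_ : Option Int) (v : Int) => v) (d.get? p.1) p.2)) PySem.Dict.empty := rfl
  rw [h0, pv_get?_foldl (fun _ v => v) l]
  have he : (PySem.Dict.empty : PySem.Dict String Int).get? k = none := rfl
  rw [he, pv_fold_last]
  cases (pvVals l k).getLast? <;> rfl

theorem pv_keysOf (l : List (String × Int)) :
    (PySem.Dict.ofList l).keys = PySem.Set.ofList (l.map Prod.fst) := by
  have h0 : PySem.Dict.ofList l
      = l.foldl (fun d p => d.insert p.1 ((fun (_ : PySem.Dict String Int) (p : String × Int) => p.2) d p)) PySem.Dict.empty := rfl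
  rw [h0, PySem.Dict.keys_foldl_insert_key]
  exact PySem.Set.update_nil_left _

theorem pv_update_dedup {α : Type} [BEq α] [LawfulBEq α] (s : PySem.Set α) (xs : List α) :
    s.update (PySem.Set.ofList xs) = s.update xs := by
  rw [PySem.Set.update_eq_append_filter, PySem.Set.update_eq_append_filter, PySem.Set.ofList_ofList]

-- ordered union of deduped key lists = dedup of the concatenation
theorem pv_keys_union (xs ys zs : List String) :
    PySem.Set.ofList ((PySem.Set.ofList xs : List String) ++ (PySem.Set.ofList ys : List String) ++ (PySem.Set.ofList zs : List String))
      = PySem.Set.ofList (xs ++ ys ++ zs) := by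
  rw [PySem.Set.ofList_append, PySem.Set.ofList_append, PySem.Set.ofList_ofList,
      pv_update_dedup, pv_update_dedup,
      PySem.Set.ofList_append, PySem.Set.ofList_append]

-- ===== VERDICT (by name: the statement is the Claim_ definition above) =====
theorem context_sentiment_py_spec : Claim_equal_context_sentiment_py := by
  intro pos_freq neg_freq neu_freq _
  simp only [Spec_context_sentiment_py, context_sentiment_py, context_sentiment_py_alt]
  -- name the three fold results
  set r0 : PySem.Dict String (List Int) :=
    pos_freq.foldl (fun d p => d.insert p.1 [p.2, 0, 0]) PySem.Dict.empty with hr0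
  set r1 := neu_freq.foldl (fun d p =>
      match d.get? p.1 with
      | some lst => d.insert p.1 (lst.set 1 p.2)
      | none     => d.insert p.1 [0, p.2, 0]) r0 with hr1
  set r2 := neg_freq.foldl (fun d p =>
      match d.get? p.1 with
      | some lst => d.insert p.1 (lst.set 2 p.2)
      | none     => d.insert p.1 [0, 0, p.2]) r1 with hr2
  -- keys of A's dict
  have h2' : (fun (d : PySem.Dict String (List Int)) (p : String × Int) =>
        match d.get? p.1 with
        | some lst => d.insert p.1 (lst.set 1 p.2)
        | none     => d.insert p.1 [0, p.2, 0])
      = fun d p => d.insert p.1 ((fun d (p : String × Int) => match PySem.Dict.get? d p.1 with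
          | some lst => lst.set 1 p.2 | none => [0, p.2, 0]) d p) := by
    funext d p; cases hg : d.get? p.1 <;> simp [hg]
  have h3' : (fun (d : PySem.Dict String (List Int)) (p : String × Int) =>
        match d.get? p.1 with
        | some lst => d.insert p.1 (lst.set 2 p.2)
        | none     => d.insert p.1 [0, 0, p.2])
      = fun d p => d.insert p.1 ((fun d (p : String × Int) => match PySem.Dict.get? d p.1 with
          | some lst => lst.set 2 p.2 | none => [0, 0, p.2]) d p) := by
    funext d p; cases hg : d.get? p.1 <;> simp [hg]
  have hk0 : r0.keys = PySem.Set.ofList (pos_freq.map Prod.fst) := by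
    rw [hr0, PySem.Dict.keys_foldl_insert_key]
    exact PySem.Set.update_nil_left _
  have hk1 : r1.keys = PySem.Set.update (PySem.Set.ofList (pos_freq.map Prod.fst)) (neu_freq.map Prod.fst) := by
    rw [hr1, h2', PySem.Dict.keys_foldl_insert_key, hk0]
  have hk2 : r2.keys = PySem.Set.ofList (pos_freq.map Prod.fst ++ neu_freq.map Prod.fst ++ neg_freq.map Prod.fst) := by
    rw [hr2, h3', PySem.Dict.keys_foldl_insert_key, hk1,
        PySem.Set.ofList_append, PySem.Set.ofList_append]
  have hnd : r2.keys.Nodup := by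
    rw [hk2]; exact PySem.Set.nodup_ofList _
  -- B's key list equals A's key list
  have hkeysB : PySem.Set.ofList ((PySem.Dict.ofList pos_freq).keys ++ (PySem.Dict.ofList neu_freq).keys ++ (PySem.Dict.ofList neg_freq).keys) = r2.keys := by
    rw [pv_keysOf, pv_keysOf, pv_keysOf, pv_keys_union, hk2]
  rw [PySem.Dict.items_eq_map_keys r2 hnd [0, 0, 0], hkeysB]
  apply List.map_congr_left
  intro k hk
  -- k really occurs in one of the three lists
  have hmem : k ∈ pos_freq.map Prod.fst ∨ k ∈ neu_freq.map Prod.fst ∨ k ∈ neg_freq.map Prod.fst := by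
    rw [hk2] at hk
    have := (PySem.Set.mem_ofList _ _).mp hk
    simpa [or_assoc] using this
  have hocc : (pvVals pos_freq k).getLast? ≠ none ∨ (pvVals neu_freq k).getLast? ≠ none
      ∨ (pvVals neg_freq k).getLast? ≠ none := by
    have key : ∀ l : List (String × Int), k ∈ l.map Prod.fst → (pvVals l k).getLast? ≠ none := by
      intro l hl
      rcases List.mem_map.mp hl with ⟨p, hp, hpk⟩
      have : p.2 ∈ pvVals l k := by
        unfold pvVals
        exact List.mem_map_of_mem (List.mem_filter.mpr ⟨hp, by simp [hpk]⟩)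
      simp only [ne_eq, List.getLast?_eq_none_iff]
      intro hnil; rw [hnil] at this; exact absurd this (List.not_mem_nil)
    rcases hmem with h | h | h
    · exact Or.inl (key _ h)
    · exact Or.inr (Or.inl (key _ h))
    · exact Or.inr (Or.inr (key _ h))
  have hA : r2.get? k = some [((pvVals pos_freq k).getLast?).getD 0,
      ((pvVals neu_freq k).getLast?).getD 0, ((pvVals neg_freq k).getLast?).getD 0] := by
    rw [hr2, hr1, hr0]
    exact pv_getA pos_freq neg_freq neu_freq k hocc
  have hgd : r2.getD k [0, 0, 0] = [((pvVals pos_freq k).getLast?).getD 0,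
      ((pvVals neu_freq k).getLast?).getD 0, ((pvVals neg_freq k).getLast?).getD 0] := by
    rw [PySem.Dict.getD_eq_get?_getD, hA]; rfl
  rw [hgd, PySem.Dict.getD_eq_get?_getD, PySem.Dict.getD_eq_get?_getD, PySem.Dict.getD_eq_get?_getD,
      pv_getOf, pv_getOf, pv_getOf]
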